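-- pv_equiv track=rewrite | github.com/martinparadiso/spin | spin/build/builder.py | is_remote
-- ===== SOURCE A (Python) =====
-- def is_remote(uri: str) -> bool:
--     _KNOWN_REMOTES = (
--         p + "://"
--         for p in (
--             "ftp",
--             "sftp",
--             "http",
--             "https",
--         )
--     )
--
--     return any(uri.startswith(p) for p in _KNOWN_REMOTES)
-- ===== SOURCE B (Python) =====
-- # Single-pass character DFA over the uri, instead of testing four prefixes.
-- # States: non-negative = alive, -1 = accepted, -2 = dead (no transition).
-- _TABLE = {
--     (0, 'f'): 1, (1, 't'): 2, (2, 'p'): 100,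
--     (0, 's'): 10, (10, 'f'): 11, (11, 't'): 12, (12, 'p'): 100,
--     (0, 'h'): 20, (20, 't'): 21, (21, 't'): 22, (22, 'p'): 23,
--     (23, 's'): 100, (23, ':'): 101,
--     (100, ':'): 101, (101, '/'): 102, (102, '/'): -1,
-- }
--
--
-- def is_remote(uri: str) -> bool:
--     state = 0
--     for ch in uri:
--         if state == -1:
--             break
--         state = _TABLE.get((state, ch), -2)
--         if state == -2:
--             return False
--     return state == -1
-- ===== Notes on version B (the rewrite author's own statement) =====
-- stated objective: alternative
-- what changed: Replaces the four startswith prefix tests by a single left-to-right pass of a hand-built character DFA (transition table, accept/dead sentinel states) that recognises exactly the four scheme prefixes.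
import Mathlib
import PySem

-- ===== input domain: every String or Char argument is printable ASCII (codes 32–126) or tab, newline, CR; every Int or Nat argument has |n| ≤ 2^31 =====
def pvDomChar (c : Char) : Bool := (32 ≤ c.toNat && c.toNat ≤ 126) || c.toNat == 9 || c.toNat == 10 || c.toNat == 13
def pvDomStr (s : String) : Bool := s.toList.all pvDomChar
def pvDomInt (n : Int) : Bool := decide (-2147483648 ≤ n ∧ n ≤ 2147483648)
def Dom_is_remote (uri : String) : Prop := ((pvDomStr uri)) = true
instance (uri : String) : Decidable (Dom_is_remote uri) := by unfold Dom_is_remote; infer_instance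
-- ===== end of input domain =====

-- B replaces the four startswith prefix tests by a single pass of a hand-built character DFA (alternative decomposition).

-- ===== PORT A =====
-- the tuple ("ftp", "sftp", "http", "https") and the generator p + "://" over it
def pvSchemes : List String := ["ftp", "sftp", "http", "https"]
def pvKnownRemotes : List String := pvSchemes.map (fun p => p ++ "://")

-- any(uri.startswith(p) for p in _KNOWN_REMOTES)
def is_remote (uri : String) : Bool :=
  pvKnownRemotes.any (fun p => PySem.Str.startswith uri p)

-- ===== PORT B =====
-- _TABLE.get((state, ch), -2): the dict lookup ported as a match on (state, char)
def pvStep (s : Int) (c : Char) : Int :=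
  if s = 0 then (if c = 'f' then 1 else if c = 's' then 10 else if c = 'h' then 20 else -2)
  else if s = 1 then (if c = 't' then 2 else -2)
  else if s = 2 then (if c = 'p' then 100 else -2)
  else if s = 10 then (if c = 'f' then 11 else -2)
  else if s = 11 then (if c = 't' then 12 else -2)
  else if s = 12 then (if c = 'p' then 100 else -2)
  else if s = 20 then (if c = 't' then 21 else -2)
  else if s = 21 then (if c = 't' then 22 else -2)
  else if s = 22 then (if c = 'p' then 23 else -2)
  else if s = 23 then (if c = 's' then 100 else if c = ':' then 101 else -2)
  else if s = 100 then (if c = ':' then 101 else -2)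
  else if s = 101 then (if c = '/' then 102 else -2)
  else if s = 102 then (if c = '/' then -1 else -2)
  else -2

-- the for-loop of Source B: break on accept (-1), return False on dead (-2), else final check state == -1
def pvLoop : Int → List Char → Bool
  | s, [] => s == -1
  | s, c :: cs =>
    if s = -1 then true
    else
      let s' := pvStep s c
      if s' = -2 then false else pvLoop s' cs

def is_remote_alt (uri : String) : Bool := pvLoop 0 uri.toList

-- ===== PRECONDITION & SPEC =====
def Spec_is_remote (uri : String) (out : Bool) : Prop := out = is_remote_alt uri
instance (uri : String) (out : Bool) : Decidable (Spec_is_remote uri out) := by unfold Spec_is_remote; infer_instance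

-- ===== CLAIM =====
def Claim_equal_is_remote : Prop := ∀ (uri : String), Dom_is_remote uri → Spec_is_remote uri (is_remote uri)

-- ===== LEMMAS AND PROOFS =====

theorem pv_cons_pref (c : Char) (w l : List Char) :
    (c :: w) <+: l ↔ ∃ cs, l = c :: cs ∧ w <+: cs := by
  cases l with
  | nil => simp
  | cons d ds =>
    rw [List.cons_prefix_cons]
    constructor
    · rintro ⟨h1, h2⟩; exact ⟨ds, by rw [h1], h2⟩
    · rintro ⟨cs, h1, h2⟩; cases h1; exact ⟨rfl, h2⟩

-- accept state
theorem pv_accept (l : List Char) : pvLoop (-1) l = true ↔ ([] : List Char) <+: l := by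
  cases l <;> simp [pvLoop]

-- one live state with a single outgoing transition
theorem pv_chainP (s t : Int) (ch : Char) (P : List Char → Prop)
    (hs : ¬ s = -1) (ht : ¬ t = -2)
    (hstep : ∀ c, pvStep s c = if c = ch then t else -2)
    (hnext : ∀ l, pvLoop t l = true ↔ P l) :
    ∀ l, pvLoop s l = true ↔ ∃ cs, l = ch :: cs ∧ P cs := by
  intro l
  cases l with
  | nil =>
    simp only [pvLoop, beq_iff_eq, hs]
    simp
  | cons c cs =>
    simp only [pvLoop, hstep c, if_neg hs]
    by_cases hc : c = ch
    · subst hc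
      rw [if_pos rfl, if_neg ht, hnext]
      constructor
      · intro h; exact ⟨cs, rfl, h⟩
      · rintro ⟨cs', h1, h2⟩; cases h1; exact h2
    · rw [if_neg hc, if_pos rfl]
      simp only [Bool.false_eq_true, false_iff]
      rintro ⟨cs', h1, -⟩
      exact hc (by injection h1)

theorem pv_chainW (s t : Int) (ch : Char) (w : List Char)
    (hs : ¬ s = -1) (ht : ¬ t = -2)
    (hstep : ∀ c, pvStep s c = if c = ch then t else -2)
    (hnext : ∀ l, pvLoop t l = true ↔ w <+: l) :
    ∀ l, pvLoop s l = true ↔ (ch :: w) <+: l := by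
  intro l
  rw [pv_chainP s t ch (fun l => w <+: l) hs ht hstep hnext l, pv_cons_pref]

theorem pvL102 : ∀ l, pvLoop 102 l = true ↔ ['/'] <+: l :=
  pv_chainW 102 (-1) '/' [] (by decide) (by decide) (fun c => by norm_num [pvStep]) pv_accept

theorem pvL101 : ∀ l, pvLoop 101 l = true ↔ ['/', '/'] <+: l :=
  pv_chainW 101 102 '/' ['/'] (by decide) (by decide) (fun c => by norm_num [pvStep]) pvL102

theorem pvL100 : ∀ l, pvLoop 100 l = true ↔ [':', '/', '/'] <+: l :=
  pv_chainW 100 101 ':' ['/', '/'] (by decide) (by decide) (fun c => by norm_num [pvStep]) pvL101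

-- the branching state after "http": 's' continues to https, ':' goes straight to the slashes
theorem pvL23 : ∀ l, pvLoop 23 l = true ↔
    (['s', ':', '/', '/'] <+: l ∨ [':', '/', '/'] <+: l) := by
  intro l
  cases l with
  | nil =>
    simp only [pvLoop]
    simp
  | cons c cs =>
    have hstep : pvStep 23 c = if c = 's' then 100 else if c = ':' then 101 else -2 := by
      norm_num [pvStep]
    simp only [pvLoop, hstep, if_neg (by decide : ¬ (23 : Int) = -1)]
    by_cases h1 : c = 's'
    · subst h1
      rw [if_pos rfl, if_neg (by decide : ¬ (100 : Int) = -2), pvL100 cs]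
      simp [pv_cons_pref]
    · rw [if_neg h1]
      by_cases h2 : c = ':'
      · subst h2
        rw [if_pos rfl, if_neg (by decide : ¬ (101 : Int) = -2), pvL101 cs]
        simp [pv_cons_pref]
      · rw [if_neg h2, if_pos rfl]
        simp only [Bool.false_eq_true, false_iff]
        rintro (h | h) <;> rw [pv_cons_pref] at h <;>
          obtain ⟨cs', he, -⟩ := h <;> [exact h1 (by injection he); exact h2 (by injection he)]

theorem pvL22 : ∀ l, pvLoop 22 l = true ↔
    (['p','s',':','/','/'] <+: l ∨ ['p',':','/','/'] <+: l) := by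
  intro l
  rw [pv_chainP 22 23 'p'
    (fun l => ['s', ':', '/', '/'] <+: l ∨ [':', '/', '/'] <+: l)
    (by decide) (by decide) (fun c => by norm_num [pvStep]) pvL23 l]
  show _ ↔ (('p' :: ['s', ':', '/', '/']) <+: l ∨ ('p' :: [':', '/', '/']) <+: l)
  rw [pv_cons_pref, pv_cons_pref]
  constructor
  · rintro ⟨cs, he, h | h⟩
    · exact Or.inl ⟨cs, he, h⟩
    · exact Or.inr ⟨cs, he, h⟩
  · rintro (⟨cs, he, h⟩ | ⟨cs, he, h⟩)
    · exact ⟨cs, he, Or.inl h⟩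
    · exact ⟨cs, he, Or.inr h⟩

theorem pvL21 : ∀ l, pvLoop 21 l = true ↔
    (['t','p','s',':','/','/'] <+: l ∨ ['t','p',':','/','/'] <+: l) := by
  intro l
  rw [pv_chainP 21 22 't'
    (fun l => ['p','s',':','/','/'] <+: l ∨ ['p',':','/','/'] <+: l)
    (by decide) (by decide) (fun c => by norm_num [pvStep]) pvL22 l]
  show _ ↔ (('t' :: ['p','s',':','/','/']) <+: l ∨ ('t' :: ['p',':','/','/']) <+: l)
  rw [pv_cons_pref, pv_cons_pref]
  constructor
  · rintro ⟨cs, he, h | h⟩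
    · exact Or.inl ⟨cs, he, h⟩
    · exact Or.inr ⟨cs, he, h⟩
  · rintro (⟨cs, he, h⟩ | ⟨cs, he, h⟩)
    · exact ⟨cs, he, Or.inl h⟩
    · exact ⟨cs, he, Or.inr h⟩

theorem pvL20 : ∀ l, pvLoop 20 l = true ↔
    (['t','t','p','s',':','/','/'] <+: l ∨ ['t','t','p',':','/','/'] <+: l) := by
  intro l
  rw [pv_chainP 20 21 't'
    (fun l => ['t','p','s',':','/','/'] <+: l ∨ ['t','p',':','/','/'] <+: l)
    (by decide) (by decide) (fun c => by norm_num [pvStep]) pvL21 l]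
  show _ ↔ (('t' :: ['t','p','s',':','/','/']) <+: l ∨ ('t' :: ['t','p',':','/','/']) <+: l)
  rw [pv_cons_pref, pv_cons_pref]
  constructor
  · rintro ⟨cs, he, h | h⟩
    · exact Or.inl ⟨cs, he, h⟩
    · exact Or.inr ⟨cs, he, h⟩
  · rintro (⟨cs, he, h⟩ | ⟨cs, he, h⟩)
    · exact ⟨cs, he, Or.inl h⟩
    · exact ⟨cs, he, Or.inr h⟩

theorem pvL2 : ∀ l, pvLoop 2 l = true ↔ ['p',':','/','/'] <+: l :=
  pv_chainW 2 100 'p' [':', '/', '/'] (by decide) (by decide)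
    (fun c => by norm_num [pvStep]) pvL100

theorem pvL1 : ∀ l, pvLoop 1 l = true ↔ ['t','p',':','/','/'] <+: l :=
  pv_chainW 1 2 't' ['p',':','/','/'] (by decide) (by decide)
    (fun c => by norm_num [pvStep]) pvL2

theorem pvL12 : ∀ l, pvLoop 12 l = true ↔ ['p',':','/','/'] <+: l :=
  pv_chainW 12 100 'p' [':', '/', '/'] (by decide) (by decide)
    (fun c => by norm_num [pvStep]) pvL100

theorem pvL11 : ∀ l, pvLoop 11 l = true ↔ ['t','p',':','/','/'] <+: l :=
  pv_chainW 11 12 't' ['p',':','/','/'] (by decide) (by decide)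
    (fun c => by norm_num [pvStep]) pvL12

theorem pvL10 : ∀ l, pvLoop 10 l = true ↔ ['f','t','p',':','/','/'] <+: l :=
  pv_chainW 10 11 'f' ['t','p',':','/','/'] (by decide) (by decide)
    (fun c => by norm_num [pvStep]) pvL11

-- the start state: branches on 'f' / 's' / 'h'
theorem pvL0 : ∀ l, pvLoop 0 l = true ↔
    (['f','t','p',':','/','/'] <+: l ∨ ['s','f','t','p',':','/','/'] <+: l ∨
     ['h','t','t','p',':','/','/'] <+: l ∨ ['h','t','t','p','s',':','/','/'] <+: l) := by
  intro l
  cases l with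
  | nil =>
    simp only [pvLoop]
    simp
  | cons c cs =>
    have hstep : pvStep 0 c = if c = 'f' then 1 else if c = 's' then 10 else if c = 'h' then 20 else -2 := by
      norm_num [pvStep]
    simp only [pvLoop, hstep, if_neg (by decide : ¬ (0 : Int) = -1)]
    by_cases h1 : c = 'f'
    · subst h1
      rw [if_pos rfl, if_neg (by decide : ¬ (1 : Int) = -2), pvL1 cs]
      simp [List.cons_prefix_cons]
    · rw [if_neg h1]
      by_cases h2 : c = 's'
      · subst h2
        rw [if_pos rfl, if_neg (by decide : ¬ (10 : Int) = -2), pvL10 cs]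
        simp [List.cons_prefix_cons]
      · rw [if_neg h2]
        by_cases h3 : c = 'h'
        · subst h3
          rw [if_pos rfl, if_neg (by decide : ¬ (20 : Int) = -2), pvL20 cs]
          simp only [List.cons_prefix_cons, true_and]
          simp
          tauto
        · rw [if_neg h3, if_pos rfl]
          simp only [Bool.false_eq_true, false_iff]
          rintro (h | h | h | h) <;> rw [pv_cons_pref] at h <;> obtain ⟨cs', he, -⟩ := h
          · exact h1 (by injection he)
          · exact h2 (by injection he)
          · exact h3 (by injection he)
          · exact h3 (by injection he)

theorem pv_main (uri : String) : is_remote uri = is_remote_alt uri := by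
  rw [Bool.eq_iff_iff]
  unfold is_remote is_remote_alt
  rw [pvL0 uri.toList]
  have e1 : ("ftp" ++ "://").toList = ['f','t','p',':','/','/'] := by decide
  have e2 : ("sftp" ++ "://").toList = ['s','f','t','p',':','/','/'] := by decide
  have e3 : ("http" ++ "://").toList = ['h','t','t','p',':','/','/'] := by decide
  have e4 : ("https" ++ "://").toList = ['h','t','t','p','s',':','/','/'] := by decide
  simp only [pvKnownRemotes, pvSchemes, List.map, List.any_cons, List.any_nil,
    Bool.or_eq_true, Bool.false_eq_true, or_false, PySem.Str.startswith_eq,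
    PySem.Chars.startswith_iff, e1, e2, e3, e4]

-- ===== VERDICT =====
theorem is_remote_spec : Claim_equal_is_remote := by
  intro uri _
  unfold Spec_is_remote
  exact pv_main uri
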